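-- pv_equiv track=rewrite | github.com/johanliebert1975/CodeForces | cf_900_1000/cf_970_div3/f.py | calc_expected
-- ===== SOURCE A (Python) =====
-- from collections import Counter
--
-- MOD = 10**9 + 7
--
-- def calc_expected(arr):
--     freq = Counter(arr)
--
--     total = 0
--     freq_weighted_sum = 0
--     freq_sum = 0
--
--     for val in sorted(freq):  # Sort to ensure i < j ordering
--         f = freq[val]
--
--         # Contribution from distinct pairs (i != j): f_i * f_j * i * j
--         total += f * val * freq_weighted_sum
--         total %= MOD
--
--         # Contribution from same elements (i == j): C(f, 2) * i^2 = (f * (f - 1) / 2) * i^2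
--         total += ((f * (f - 1) // 2) * val * val) % MOD
--         total %= MOD
--
--         freq_weighted_sum += f * val
--         freq_weighted_sum %= MOD
--
--         freq_sum += f
--         freq_sum %= MOD
--
--     # Now compute expected value: total / C(n, 2) = total * inverse(freq_sum_C2)
--     total_pairs = freq_sum * (freq_sum - 1) // 2
--     if total_pairs == 0:
--         return 0  # No pairs
--
--     inv = pow(total_pairs, MOD - 2, MOD)  # Modular inverse
--     return (total * inv) % MOD
-- ===== SOURCE B (Python) =====
-- MOD = 10**9 + 7
--
-- def calc_expected(arr):
--     n = len(arr)
--     pairs = n * (n - 1) // 2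
--     if pairs == 0:
--         return 0
--     s = 0
--     q = 0
--     for x in arr:
--         s += x
--         q += x * x
--     total = ((s * s - q) // 2) % MOD
--     return total * pow(pairs, MOD - 2, MOD) % MOD
-- ===== Notes on version B (the rewrite author's own statement) =====
-- stated objective: faster
-- what changed: B drops the Counter/sort/grouped scan and computes the sum over all pairs in closed form ((S^2 - sum of squares)/2) in a single pass, then applies the same modular inverse of C(n,2).
import Mathlib
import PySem

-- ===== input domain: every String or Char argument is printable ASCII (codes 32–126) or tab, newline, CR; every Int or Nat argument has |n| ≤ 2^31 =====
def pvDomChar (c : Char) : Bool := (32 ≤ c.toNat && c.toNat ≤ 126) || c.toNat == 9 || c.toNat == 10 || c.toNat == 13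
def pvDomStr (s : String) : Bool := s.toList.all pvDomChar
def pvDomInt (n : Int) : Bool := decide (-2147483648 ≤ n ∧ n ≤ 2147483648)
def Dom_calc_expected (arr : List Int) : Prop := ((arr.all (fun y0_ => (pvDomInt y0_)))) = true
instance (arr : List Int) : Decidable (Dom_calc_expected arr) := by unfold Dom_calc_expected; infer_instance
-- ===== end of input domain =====

-- B drops A's Counter+sort grouping and computes the pair-product sum in one pass via the
-- closed form (S^2 - sum of squares)/2; return values agree on all inputs (objective: faster, O(k) vs O(k log k)).

-- the module constant MOD = 10**9 + 7
def pvMOD : Int := 1000000007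

-- hand-written port of Python's three-argument pow(b, e, m) (square-and-multiply);
-- exact for m > 0: pvPowMod_eq below proves pvPowMod b e m = b ^ e % m
def pvPowMod (b : Int) (e : Nat) (m : Int) : Int :=
  if h : e = 0 then 1 % m
  else
    let r := pvPowMod b (e / 2) m
    let r2 := r * r % m
    if e % 2 = 1 then r2 * b % m else r2
termination_by e
decreasing_by exact Nat.div_lt_self (Nat.pos_of_ne_zero h) one_lt_two

-- ===== PORT A =====
def calc_expected (arr : List Int) : Int :=
  let freq := PySem.Dict.counter arr
  let st := (PySem.List.sorted freq.keys (fun x => x)).foldl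
    (fun (st : Int × Int × Int) val =>
      let f := freq.getD val 0
      let total := PySem.Int.mod (st.1 + f * val * st.2.1) pvMOD
      let total := PySem.Int.mod (total + PySem.Int.mod (PySem.Int.floordiv (f * (f - 1)) 2 * val * val) pvMOD) pvMOD
      let fws := PySem.Int.mod (st.2.1 + f * val) pvMOD
      let fs := PySem.Int.mod (st.2.2 + f) pvMOD
      (total, fws, fs))
    (0, 0, 0)
  let totalPairs := PySem.Int.floordiv (st.2.2 * (st.2.2 - 1)) 2
  if totalPairs = 0 then 0
  else PySem.Int.mod (st.1 * pvPowMod totalPairs 1000000005 pvMOD) pvMOD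

-- ===== PORT B =====
def calc_expected_alt (arr : List Int) : Int :=
  let n : Int := (arr.length : Int)
  let pairs := PySem.Int.floordiv (n * (n - 1)) 2
  if pairs = 0 then 0
  else
    let sq := arr.foldl (fun (sq : Int × Int) x => (sq.1 + x, sq.2 + x * x)) (0, 0)
    let total := PySem.Int.mod (PySem.Int.floordiv (sq.1 * sq.1 - sq.2) 2) pvMOD
    PySem.Int.mod (total * pvPowMod pairs 1000000005 pvMOD) pvMOD

-- ===== PRECONDITION & SPEC =====
def Spec_calc_expected (arr : List Int) (out : Int) : Prop := out = calc_expected_alt arr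
instance (arr : List Int) (out : Int) : Decidable (Spec_calc_expected arr out) := by unfold Spec_calc_expected; infer_instance

-- ===== CLAIM (what is proved, stated in full; the proofs are below) =====
def Claim_equal_calc_expected : Prop := ∀ (arr : List Int), Dom_calc_expected arr → Spec_calc_expected arr (calc_expected arr)

-- ===== LEMMAS AND PROOFS =====

-- the multiplicity function A reads off its Counter
def pvC (arr : List Int) : Int → Int := fun v => ((arr.count v : Int))

-- A's loop body with the mod reductions stripped (exact integer state)
def pvEStep (c : Int → Int) (s : Int × Int × Int) (v : Int) : Int × Int × Int :=
  (s.1 + c v * v * s.2.1 + c v * (c v - 1) / 2 * v * v, s.2.1 + c v * v, s.2.2 + c v)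

-- A's loop body as ported (every component reduced mod 10^9+7), with mod/floordiv as emod/ediv
def pvMStep (c : Int → Int) (s : Int × Int × Int) (v : Int) : Int × Int × Int :=
  (((s.1 + c v * v * s.2.1) % 1000000007 + c v * (c v - 1) / 2 * v * v % 1000000007) % 1000000007,
   (s.2.1 + c v * v) % 1000000007,
   (s.2.2 + c v) % 1000000007)

lemma pvPowMod_eq (m : Int) : ∀ (e : Nat) (b : Int), pvPowMod b e m = b ^ e % m := by
  intro e
  induction e using Nat.strong_induction_on with
  | _ e ih =>
    intro b
    rw [pvPowMod]
    split
    · rename_i h; subst h; simp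
    · rename_i h
      rw [ih (e / 2) (Nat.div_lt_self (Nat.pos_of_ne_zero h) one_lt_two)]
      have hr : (b ^ (e / 2) % m) ≡ b ^ (e / 2) [ZMOD m] := Int.emod_emod_of_dvd _ dvd_rfl
      by_cases hpar : e % 2 = 1
      · simp only [hpar, if_pos]
        have hA : ((b ^ (e / 2) % m) * (b ^ (e / 2) % m) % m)
            ≡ b ^ (e / 2) * b ^ (e / 2) [ZMOD m] :=
          (Int.emod_emod_of_dvd _ dvd_rfl).trans (hr.mul hr)
        have h1 : ((b ^ (e / 2) % m) * (b ^ (e / 2) % m) % m) * b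
            ≡ b ^ (e / 2) * b ^ (e / 2) * b [ZMOD m] := hA.mul (Int.ModEq.refl b)
        have h2 : b ^ (e / 2) * b ^ (e / 2) * b = b ^ e := by
          conv_rhs => rw [show e = e / 2 + e / 2 + 1 by omega]
          rw [pow_succ, pow_add]
        rw [← h2]; exact h1
      · simp only [hpar, ite_false]
        have h1 : (b ^ (e / 2) % m) * (b ^ (e / 2) % m)
            ≡ b ^ (e / 2) * b ^ (e / 2) [ZMOD m] := hr.mul hr
        have h2 : b ^ (e / 2) * b ^ (e / 2) = b ^ e := by
          conv_rhs => rw [show e = e / 2 + e / 2 by omega]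
          rw [pow_add]
        rw [← h2]; exact h1

lemma pv_half (c : Int) : 2 * (c * (c - 1) / 2) = c * (c - 1) := by
  have h : (2:Int) ∣ c * (c - 1) := by
    rcases Int.even_or_odd c with ⟨k, hk⟩ | ⟨k, hk⟩
    · exact ⟨k * (c - 1), by linear_combination (c - 1) * hk⟩
    · exact ⟨c * k, by linear_combination c * hk⟩
  exact Int.mul_ediv_cancel' h

lemma pvEFold_snd (c : Int → Int) (K : List Int) : ∀ s : Int × Int × Int,
    (K.foldl (pvEStep c) s).2 =
      (s.2.1 + (K.map (fun v => c v * v)).sum, s.2.2 + (K.map c).sum) := by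
  induction K with
  | nil => intro s; simp
  | cons v K ih =>
    intro s
    simp only [List.foldl_cons, List.map_cons, List.sum_cons, ih, pvEStep]
    simp only [Prod.mk.injEq]
    constructor <;> ring

lemma pvEFold_fst (c : Int → Int) (K : List Int) : ∀ s : Int × Int × Int,
    2 * (K.foldl (pvEStep c) s).1 =
      2 * s.1 + (s.2.1 + (K.map (fun v => c v * v)).sum) * (s.2.1 + (K.map (fun v => c v * v)).sum)
        - s.2.1 * s.2.1 - (K.map (fun v => c v * (v * v))).sum := by
  induction K with
  | nil => intro s; simp
  | cons v K ih =>
    intro s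
    simp only [List.foldl_cons, List.map_cons, List.sum_cons, ih, pvEStep]
    have hd := pv_half (c v)
    linear_combination (v * v) * hd

lemma pvMFold (c : Int → Int) (K : List Int) : ∀ s : Int × Int × Int,
    K.foldl (pvMStep c) (s.1 % 1000000007, s.2.1 % 1000000007, s.2.2 % 1000000007) =
      ((K.foldl (pvEStep c) s).1 % 1000000007,
       (K.foldl (pvEStep c) s).2.1 % 1000000007,
       (K.foldl (pvEStep c) s).2.2 % 1000000007) := by
  induction K with
  | nil => intro s; simp
  | cons v K ih =>
    intro s
    have hself : ∀ x : Int, x % 1000000007 ≡ x [ZMOD 1000000007] :=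
      fun x => Int.emod_emod_of_dvd x dvd_rfl
    have ht : (((s.1 % 1000000007 + c v * v * (s.2.1 % 1000000007)) % 1000000007
          + c v * (c v - 1) / 2 * v * v % 1000000007) % 1000000007)
        = (s.1 + c v * v * s.2.1 + c v * (c v - 1) / 2 * v * v) % 1000000007 := by
      have h1 : (s.1 % 1000000007 + c v * v * (s.2.1 % 1000000007))
          ≡ s.1 + c v * v * s.2.1 [ZMOD 1000000007] :=
        (hself s.1).add ((Int.ModEq.refl (c v * v)).mul (hself s.2.1))
      have h2 := ((hself _).trans h1).add (hself (c v * (c v - 1) / 2 * v * v))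
      simpa using (Int.emod_emod_of_dvd _ dvd_rfl).trans h2
    have hw : (s.2.1 % 1000000007 + c v * v) % 1000000007 = (s.2.1 + c v * v) % 1000000007 :=
      Int.emod_add_emod s.2.1 1000000007 (c v * v)
    have hf : (s.2.2 % 1000000007 + c v) % 1000000007 = (s.2.2 + c v) % 1000000007 :=
      Int.emod_add_emod s.2.2 1000000007 (c v)
    have hstep : pvMStep c (s.1 % 1000000007, s.2.1 % 1000000007, s.2.2 % 1000000007) v =
        ((pvEStep c s v).1 % 1000000007, (pvEStep c s v).2.1 % 1000000007,
         (pvEStep c s v).2.2 % 1000000007) := by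
      simp only [pvMStep, pvEStep, ht, hw, hf]
    simp only [List.foldl_cons, hstep, ih (pvEStep c s v)]

lemma pv_group (arr K : List Int) (hn : K.Nodup) (hm : ∀ v, v ∈ K ↔ v ∈ arr) (g : Int → Int) :
    (K.map (fun v => (arr.count v : Int) * g v)).sum = (arr.map g).sum := by
  have h1 : (K.map (fun v => (arr.count v : Int) * g v)).sum
      = K.toFinset.sum (fun v => (arr.count v : Int) * g v) :=
    (List.sum_toFinset _ hn).symm
  have h2 : K.toFinset = arr.toFinset := by
    ext v; simp [List.mem_toFinset, hm]
  rw [h1, h2, Finset.sum_list_map_count]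
  exact Finset.sum_congr rfl (fun v _ => by rw [nsmul_eq_mul])

-- replacing n by n % MOD before forming C(n,2) does not change it mod MOD
lemma pv_pairs_mod (n : Int) :
    (n % 1000000007) * ((n % 1000000007) - 1) / 2 % 1000000007 = n * (n - 1) / 2 % 1000000007 := by
  set r := n % 1000000007 with hr
  have hnr : (1000000007 : Int) ∣ (n - r) := ⟨n / 1000000007, by rw [hr]; omega⟩
  have h2 : (2 : Int) ∣ (n - r) * (n + r - 1) := by
    rcases Int.even_or_odd (n - r) with ⟨k, hk⟩ | ⟨k, hk⟩
    · exact ⟨k * (n + r - 1), by linear_combination (n + r - 1) * hk⟩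
    · exact ⟨(n - r) * (k + r), by linear_combination (n - r) * hk⟩
  have hcop : IsCoprime (2 : Int) 1000000007 :=
    Int.isCoprime_iff_gcd_eq_one.mpr (by norm_num)
  obtain ⟨k, hk⟩ := hcop.mul_dvd h2 (dvd_mul_of_dvd_left hnr _)
  obtain ⟨j, hj⟩ : (2 : Int) ∣ r * (r - 1) := by
    rcases Int.even_or_odd r with ⟨m, hm⟩ | ⟨m, hm⟩
    · exact ⟨m * (r - 1), by linear_combination (r - 1) * hm⟩
    · exact ⟨r * m, by linear_combination r * hm⟩
  have hnn : n * (n - 1) = 2 * (j + 1000000007 * k) := by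
    have : n * (n - 1) - r * (r - 1) = (n - r) * (n + r - 1) := by ring
    omega
  have e1 : n * (n - 1) / 2 = j + 1000000007 * k := by
    rw [hnn]; exact Int.mul_ediv_cancel_left _ (by norm_num)
  have e2 : r * (r - 1) / 2 = j := by
    rw [hj]; exact Int.mul_ediv_cancel_left _ (by norm_num)
  rw [e1, e2, Int.add_mul_emod_self_left]

-- characterisation of A's result in terms of sum / sum of squares / length
lemma pvA_char (arr : List Int) :
    calc_expected arr =
      (if ((arr.length : Int) % 1000000007) * (((arr.length : Int) % 1000000007) - 1) / 2 = 0 then 0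
       else ((arr.sum * arr.sum - ((arr.map (fun v => v * v)).sum)) / 2 % 1000000007 *
         ((((arr.length : Int) % 1000000007) * (((arr.length : Int) % 1000000007) - 1) / 2) ^ 1000000005 % 1000000007)) % 1000000007) := by
  have hM : (0:Int) < 1000000007 := by norm_num
  have h2 : (0:Int) < 2 := by norm_num
  have hnd : (PySem.List.sorted (PySem.Set.ofList arr) (fun x : Int => x)).Nodup :=
    ((PySem.List.sorted_perm _ _ _).nodup_iff).mpr (PySem.Set.nodup_ofList arr)
  have hmem : ∀ v, v ∈ PySem.List.sorted (PySem.Set.ofList arr) (fun x : Int => x) ↔ v ∈ arr :=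
    fun v => by rw [PySem.List.mem_sorted, PySem.Set.mem_ofList]
  set K := PySem.List.sorted (PySem.Set.ofList arr) (fun x : Int => x) with hK
  simp only [calc_expected, pvMOD, PySem.Dict.keys_counter, PySem.Dict.getD_counter,
    PySem.Int.mod_eq_emod_of_pos hM, PySem.Int.floordiv_eq_ediv_of_pos h2,
    ]
  simp only [show ∀ (b : Int), pvPowMod b 1000000005 1000000007 = b ^ 1000000005 % 1000000007
    from fun b => pvPowMod_eq 1000000007 1000000005 b]
  rw [show (fun (st : Int × Int × Int) (val : Int) =>
      ((((st.1 + (arr.count val : Int) * val * st.2.1) % 1000000007 +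
          ((arr.count val : Int) * ((arr.count val : Int) - 1) / 2 * val * val) % 1000000007) % 1000000007,
        (st.2.1 + (arr.count val : Int) * val) % 1000000007,
        (st.2.2 + (arr.count val : Int)) % 1000000007) : Int × Int × Int)) = pvMStep (pvC arr) from rfl]
  have hfold := pvMFold (pvC arr) K (0, 0, 0)
  simp only [Int.zero_emod] at hfold
  rw [hfold]
  have hsnd := pvEFold_snd (pvC arr) K (0, 0, 0)
  have hfst := pvEFold_fst (pvC arr) K (0, 0, 0)
  simp only [zero_add, mul_zero, sub_zero] at hsnd hfst
  have hS : (K.map (fun v => pvC arr v * v)).sum = arr.sum := by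
    have := pv_group arr K hnd hmem (fun v => v)
    simpa [pvC] using this
  have hQ : (K.map (fun v => pvC arr v * (v * v))).sum = (arr.map (fun v => v * v)).sum :=
    pv_group arr K hnd hmem (fun v => v * v)
  have hN : (K.map (pvC arr)).sum = (arr.length : Int) := by
    have h1 : K.map (pvC arr) = K.map (fun v => (arr.count v : Int) * 1) := by simp [pvC]
    rw [h1, pv_group arr K hnd hmem (fun _ => 1), PySem.List.sum_map_const_int]
    ring
  have hT : (K.foldl (pvEStep (pvC arr)) (0, 0, 0)).1
      = (arr.sum * arr.sum - (arr.map (fun v => v * v)).sum) / 2 := by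
    have h2T : 2 * (K.foldl (pvEStep (pvC arr)) (0, 0, 0)).1
        = arr.sum * arr.sum - (arr.map (fun v => v * v)).sum := by
      rw [hfst, hS, hQ]
    rw [← h2T, Int.mul_ediv_cancel_left _ (by norm_num)]
  have hF : (K.foldl (pvEStep (pvC arr)) (0, 0, 0)).2.2 = (arr.length : Int) := by
    rw [hsnd]; simpa using hN
  rw [hT, hF]

-- characterisation of B's result in the same terms
lemma pvB_char (arr : List Int) :
    calc_expected_alt arr =
      (if (arr.length : Int) * ((arr.length : Int) - 1) / 2 = 0 then 0
       else ((arr.sum * arr.sum - ((arr.map (fun v => v * v)).sum)) / 2 % 1000000007 *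
         (((arr.length : Int) * ((arr.length : Int) - 1) / 2) ^ 1000000005 % 1000000007)) % 1000000007) := by
  have hM : (0:Int) < 1000000007 := by norm_num
  have h2 : (0:Int) < 2 := by norm_num
  simp only [calc_expected_alt, pvMOD, PySem.Int.mod_eq_emod_of_pos hM,
    PySem.Int.floordiv_eq_ediv_of_pos h2]
  simp only [show ∀ (b : Int), pvPowMod b 1000000005 1000000007 = b ^ 1000000005 % 1000000007
    from fun b => pvPowMod_eq 1000000007 1000000005 b]
  have hp : List.foldl (fun (sq : Int × Int) x => (sq.1 + x, sq.2 + x * x)) (0, 0) arr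
      = (List.foldl (fun (a : Int) x => a + x) 0 arr, List.foldl (fun (b : Int) x => b + x * x) 0 arr) :=
    PySem.List.foldl_prod_mk (fun (a : Int) x => a + x) (fun (b : Int) x => b + x * x) arr 0 0
  have hs : List.foldl (fun (a : Int) x => a + x) 0 arr = arr.sum := by
    rw [PySem.List.foldl_add arr (fun x => x) 0]; simp
  rw [hp]
  simp only [PySem.List.foldl_add, zero_add, hs]

-- ===== VERDICT (by name: the statement is the Claim_ definition above) =====
theorem calc_expected_spec : Claim_equal_calc_expected := by
  intro arr _
  unfold Spec_calc_expected
  rw [pvA_char, pvB_char]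
  set n : Int := (arr.length : Int) with hn
  have hn0 : 0 ≤ n := by positivity
  set r : Int := n % 1000000007 with hr
  set T : Int := (arr.sum * arr.sum - ((arr.map (fun v => v * v)).sum)) / 2 % 1000000007 with hT
  have hmod : r * (r - 1) / 2 % 1000000007 = n * (n - 1) / 2 % 1000000007 := pv_pairs_mod n
  by_cases hA : r * (r - 1) / 2 = 0
  · by_cases hB : n * (n - 1) / 2 = 0
    · simp [hA, hB]
    · -- A returns 0; B multiplies by a power of a multiple of MOD, hence 0
      have h0 : n * (n - 1) / 2 % 1000000007 = 0 := by rw [← hmod, hA]; norm_num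
      have hdvd : (1000000007 : Int) ∣ n * (n - 1) / 2 := Int.dvd_of_emod_eq_zero h0
      have hp : (n * (n - 1) / 2) ^ 1000000005 % 1000000007 = 0 :=
        Int.emod_eq_zero_of_dvd (dvd_pow hdvd (by norm_num))
      simp [hA, hB, hp]
  · by_cases hB : n * (n - 1) / 2 = 0
    · exfalso
      -- pairs = 0 forces n ≤ 1, but then r = n and A's pair count is 0 too
      have hle : n ≤ 1 := by
        by_contra h
        push Not at h
        have h2 : (2 : Int) ≤ n * (n - 1) := by nlinarith
        have : 1 ≤ n * (n - 1) / 2 := by omega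
        omega
      have : r = n := by omega
      rw [this, hB] at hA
      exact hA rfl
    · have hpow : (r * (r - 1) / 2) ^ 1000000005 % 1000000007
          = (n * (n - 1) / 2) ^ 1000000005 % 1000000007 :=
        Int.ModEq.pow 1000000005 hmod
      simp [hA, hB, hpow]
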